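-- pv_equiv track=rewrite | github.com/rohitkumar7048/crypto-lab | Cryptography Lab/10-09-25 Cryptography Lab 4/Question10.py | non_twin_primes
-- ===== SOURCE A (Python) =====
-- def is_prime(n):
--     if n <= 1:
--         return False
--     if n == 2:
--         return True
--     if n % 2 == 0:
--         return False
--     for i in range(3, int(n**0.5) + 1, 2):
--         if n % i == 0:
--             return False
--     return True
--
-- def non_twin_primes(limit):
--     results = []
--     prev = 7
--     for n in range(11, limit + 1):
--         if is_prime(n):
--             if n - prev > 2:
--                 results.append((prev, n))
--             prev = n
--     return results
-- ===== SOURCE B (Python) =====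
-- def non_twin_primes(limit):
--     # Sieve composites up to limit, then one scan pairing consecutive primes with gap > 2.
--     composite = [False] * (limit + 1 if limit >= 0 else 0)
--     for i in range(2, limit + 1):
--         for m in range(2 * i, limit + 1, i):
--             composite[m] = True
--     ps = [7] + [n for n in range(11, limit + 1) if not composite[n]]
--     return [(p, q) for p, q in zip(ps, ps[1:]) if q - p > 2]
-- ===== Notes on version B (the rewrite author's own statement) =====
-- stated objective: faster
-- what changed: Replaces per-number trial division (odd divisors up to sqrt(n)) by a composite-marking sieve up to limit followed by a single zip-consecutive scan of the prime list.
import Mathlib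
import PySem

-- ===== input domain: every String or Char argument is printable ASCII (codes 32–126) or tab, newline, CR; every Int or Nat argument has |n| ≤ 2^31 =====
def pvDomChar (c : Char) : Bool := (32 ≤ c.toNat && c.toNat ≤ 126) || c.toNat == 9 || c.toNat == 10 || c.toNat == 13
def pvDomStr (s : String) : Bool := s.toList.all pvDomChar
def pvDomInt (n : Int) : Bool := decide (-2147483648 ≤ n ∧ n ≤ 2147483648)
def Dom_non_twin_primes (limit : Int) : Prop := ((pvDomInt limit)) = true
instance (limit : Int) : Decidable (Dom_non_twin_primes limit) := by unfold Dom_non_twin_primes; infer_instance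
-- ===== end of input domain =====

-- B replaces A's per-number trial division by a composite-marking sieve up to limit plus a
-- single zip-consecutive scan of the resulting prime list (objective: faster).

-- ===== PORT A =====
-- int(n**0.5): exact integer sqrt; equal to Python's float expression for |n| ≤ 2^31 (Dom).
def pvIsqrt (n : Int) : Int := ((Int.toNat n).sqrt : Int)

def pvIsPrime (n : Int) : Bool :=
  if n ≤ 1 then false
  else if n = 2 then true
  else if PySem.Int.mod n 2 = 0 then false
  else (PySem.List.pyRange 3 (pvIsqrt n + 1) 2).all (fun i => !(decide (PySem.Int.mod n i = 0)))

def non_twin_primes (limit : Int) : List (List Int) :=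
  ((PySem.List.pyRange 11 (limit + 1) 1).foldl
    (fun (st : List (List Int) × Int) n =>
      if pvIsPrime n then
        (if n - st.2 > 2 then st.1 ++ [[st.2, n]] else st.1, n)
      else st)
    ([], 7)).1

-- ===== PORT B =====
-- composite = [False]*(limit+1); for i in 2..limit: for m in 2i..limit step i: composite[m] = True
def pvSieve (limit : Int) : List Bool :=
  (PySem.List.pyRange 2 (limit + 1) 1).foldl
    (fun comp i =>
      (PySem.List.pyRange (2 * i) (limit + 1) i).foldl
        (fun c m => PySem.List.pySetD c m true) comp)
    (List.replicate (limit + 1).toNat false)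

def non_twin_primes_alt (limit : Int) : List (List Int) :=
  let composite := pvSieve limit
  let ps := 7 :: (PySem.List.pyRange 11 (limit + 1) 1).filter
      (fun n => !(PySem.List.pyGetD composite n false))
  ((ps.zip ps.tail).filter (fun pq => pq.2 - pq.1 > 2)).map (fun pq => [pq.1, pq.2])

-- ===== PRECONDITION & SPEC =====
def Spec_non_twin_primes (limit : Int) (out : List (List Int)) : Prop := out = non_twin_primes_alt limit
instance (limit : Int) (out : List (List Int)) : Decidable (Spec_non_twin_primes limit out) := by unfold Spec_non_twin_primes; infer_instance

-- ===== CLAIM (what is proved, stated in full; the proofs are below) =====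
def Claim_equal_non_twin_primes : Prop := ∀ (limit : Int), Dom_non_twin_primes limit → Spec_non_twin_primes limit (non_twin_primes limit)

-- ===== LEMMAS AND PROOFS =====

-- the inner marking fold preserves the list length
theorem pvMark_length (l : List Int) (c : List Bool) (h : ∀ m ∈ l, 0 ≤ m) :
    (l.foldl (fun c m => PySem.List.pySetD c m true) c).length = c.length := by
  induction l generalizing c with
  | nil => rfl
  | cons m t ih =>
    rw [List.foldl_cons, ih _ (fun x hx => h x (List.mem_cons_of_mem _ hx)),
        PySem.List.pySetD_of_nonneg _ _ (h m (List.mem_cons_self ..)), List.length_set]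

-- inner marking fold: what a cell reads afterwards
theorem pvMark_getD (l : List Int) (c : List Bool) (j : Nat) (h : ∀ m ∈ l, 0 ≤ m) :
    ((l.foldl (fun c m => PySem.List.pySetD c m true) c).getD j false = true
      ↔ (c.getD j false = true ∨ ((j : Int) ∈ l ∧ j < c.length))) := by
  induction l generalizing c with
  | nil => simp
  | cons m t ih =>
    have hm : 0 ≤ m := h m (List.mem_cons_self ..)
    rw [List.foldl_cons, PySem.List.pySetD_of_nonneg _ _ hm,
        ih _ (fun x hx => h x (List.mem_cons_of_mem _ hx)), List.length_set]
    have hgd : (c.set m.toNat true).getD j false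
        = if m.toNat = j ∧ j < c.length then true else c.getD j false := by
      by_cases hj : m.toNat = j
      · subst hj
        by_cases hlt : m.toNat < c.length
        · simp [List.getD, hlt]
        · simp [List.getD, hlt]
      · simp [List.getD, List.getElem?_set_ne hj, hj]
    rw [hgd]
    have hjm : ((j : Int) = m) ↔ (m.toNat = j) := by omega
    simp only [List.mem_cons, hjm]
    split_ifs with hc
    · constructor
      · intro _; exact Or.inr ⟨Or.inl hc.1, hc.2⟩
      · intro _; exact Or.inl rfl
    · tauto

-- outer fold: a cell is set iff the inner range of some listed i contains it
theorem pvOuter_getD (limit : Int) (l : List Int) (c : List Bool) (j : Nat)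
    (h : ∀ i ∈ l, 0 < i) :
    ((l.foldl (fun comp i =>
        (PySem.List.pyRange (2 * i) (limit + 1) i).foldl
          (fun c m => PySem.List.pySetD c m true) comp) c).getD j false = true
      ↔ (c.getD j false = true ∨
          ∃ i ∈ l, (j : Int) ∈ PySem.List.pyRange (2 * i) (limit + 1) i ∧ j < c.length)) := by
  induction l generalizing c with
  | nil => simp
  | cons i t ih =>
    have hi : 0 < i := h i (List.mem_cons_self ..)
    have hpos : ∀ m ∈ PySem.List.pyRange (2 * i) (limit + 1) i, 0 ≤ m := by
      intro m hm
      have := (PySem.List.mem_pyRange_iff_of_pos hi m).mp hm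
      omega
    rw [List.foldl_cons, ih _ (fun x hx => h x (List.mem_cons_of_mem _ hx)),
        pvMark_getD _ _ _ hpos, pvMark_length _ _ hpos]
    simp only [List.mem_cons]
    constructor
    · rintro ((h1 | h1) | ⟨i', hi', hj⟩)
      · exact Or.inl h1
      · exact Or.inr ⟨i, Or.inl rfl, h1⟩
      · exact Or.inr ⟨i', Or.inr hi', hj⟩
    · rintro (h1 | ⟨i', (rfl | hi'), hj⟩)
      · exact Or.inl (Or.inl h1)
      · exact Or.inl (Or.inr hj)
      · exact Or.inr ⟨i', hi', hj⟩

-- the outer fold preserves the length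
theorem pvOuter_length (limit : Int) (l : List Int) (c : List Bool) (h : ∀ i ∈ l, 0 < i) :
    (l.foldl (fun comp i =>
        (PySem.List.pyRange (2 * i) (limit + 1) i).foldl
          (fun c m => PySem.List.pySetD c m true) comp) c).length = c.length := by
  induction l generalizing c with
  | nil => rfl
  | cons i t ih =>
    have hi : 0 < i := h i (List.mem_cons_self ..)
    have hpos : ∀ m ∈ PySem.List.pyRange (2 * i) (limit + 1) i, 0 ≤ m := by
      intro m hm
      have := (PySem.List.mem_pyRange_iff_of_pos hi m).mp hm
      omega
    rw [List.foldl_cons, ih _ (fun x hx => h x (List.mem_cons_of_mem _ hx)),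
        pvMark_length _ _ hpos]

-- the sieve keeps the length of the initial [False]*(limit+1)
theorem pvSieve_length (limit : Int) : (pvSieve limit).length = (limit + 1).toNat := by
  unfold pvSieve
  rw [pvOuter_length limit _ _ (fun i hi => by
    have := (PySem.List.mem_pyRange_one ..).mp hi; omega)]
  exact List.length_replicate

-- sieve characterisation: cell n is marked iff n = i*k with i,k ≥ 2 (given 0 ≤ n ≤ limit)
theorem pvSieve_getD (limit n : Int) (h0 : 0 ≤ n) (h1 : n ≤ limit) :
    ((pvSieve limit).getD n.toNat false = true
      ↔ ∃ i k : Int, 2 ≤ i ∧ 2 ≤ k ∧ i * k = n) := by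
  unfold pvSieve
  rw [pvOuter_getD limit _ _ _ (fun i hi => by
    have := (PySem.List.mem_pyRange_one ..).mp hi; omega)]
  have hrep : (List.replicate (limit + 1).toNat false).getD n.toNat false = false := by
    simp [List.getD, List.getElem?_replicate]
    split <;> rfl
  rw [hrep]
  have hcast : ((n.toNat : Int)) = n := by omega
  simp only [Bool.false_eq_true, false_or, List.length_replicate, hcast]
  constructor
  · rintro ⟨i, hil, hmem, hlen⟩
    have hi2 : 2 ≤ i := ((PySem.List.mem_pyRange_one ..).mp hil).1
    rw [PySem.List.mem_pyRange_iff_of_pos (by omega)] at hmem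
    obtain ⟨hle, hlt, d, hd⟩ := hmem
    have hd0 : 0 ≤ d := by
      have hnn : 0 ≤ i * d := by linarith
      exact (mul_nonneg_iff_of_pos_left (by omega)).mp hnn
    exact ⟨i, d + 2, hi2, by omega, by linear_combination -hd⟩
  · rintro ⟨i, k, hi2, hk2, hik⟩
    refine ⟨i, ?_, ?_, by omega⟩
    · rw [PySem.List.mem_pyRange_one]
      exact ⟨by omega, by nlinarith⟩
    · rw [PySem.List.mem_pyRange_iff_of_pos (by omega)]
      exact ⟨by nlinarith, by omega, ⟨k - 2, by linear_combination -hik⟩⟩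

-- A's trial division is primality of n (for 2 ≤ n)
theorem pvIsPrime_iff (n : Int) (h : 2 ≤ n) :
    (pvIsPrime n = true ↔ Nat.Prime n.toNat) := by
  unfold pvIsPrime
  rw [if_neg (by omega)]
  by_cases h2 : n = 2
  · subst h2; simpa using Nat.prime_two
  · rw [if_neg h2]
    have hn3 : 3 ≤ n := by omega
    by_cases heven : PySem.Int.mod n 2 = 0
    · rw [if_pos heven]
      have hdvd : (2 : Int) ∣ n := (PySem.Int.mod_eq_zero_iff_dvd n 2).mp heven
      simp only [Bool.false_eq_true, false_iff]
      intro hp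
      have h2n : (2 : Nat) ∣ n.toNat := by omega
      have := hp.eq_one_or_self_of_dvd 2 h2n
      omega
    · rw [if_neg heven]
      have hodd : ¬ (2 : Int) ∣ n := fun hd => heven ((PySem.Int.mod_eq_zero_iff_dvd n 2).mpr hd)
      rw [List.all_eq_true]
      simp only [Bool.not_eq_eq_eq_not, Bool.not_true, decide_eq_false_iff_not]
      constructor
      · intro hall
        rw [Nat.prime_def_le_sqrt]
        refine ⟨by omega, fun m hm2 hmsq hmdvd => ?_⟩
        by_cases hme : m % 2 = 0
        · have h2N : (2 : Nat) ∣ n.toNat := dvd_trans (by omega) hmdvd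
          exact hodd (by omega)
        · have hmem : ((m : Int)) ∈ PySem.List.pyRange 3 (pvIsqrt n + 1) 2 := by
            rw [PySem.List.mem_pyRange_iff_of_pos (by omega)]
            unfold pvIsqrt
            refine ⟨by omega, by omega, by omega⟩
          apply hall _ hmem
          rw [PySem.Int.mod_eq_zero_iff_dvd]
          have : ((m : Int)) ∣ ((n.toNat : Int)) := Int.natCast_dvd_natCast.mpr hmdvd
          rwa [Int.toNat_of_nonneg (by omega)] at this
      · intro hp i hi hmod
        rw [PySem.List.mem_pyRange_iff_of_pos (by omega)] at hi
        unfold pvIsqrt at hi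
        have hidvd : i ∣ n := (PySem.Int.mod_eq_zero_iff_dvd n i).mp hmod
        have hnat : i.toNat ∣ n.toNat := by
          have e1 : i.toNat = i.natAbs := by omega
          have e2 : n.toNat = n.natAbs := by omega
          rw [e1, e2]
          exact Int.natAbs_dvd_natAbs.mpr hidvd
        have hsq : i.toNat ≤ Nat.sqrt n.toNat := by omega
        have hlt : Nat.sqrt n.toNat < n.toNat := Nat.sqrt_lt_self (by omega)
        have := hp.eq_one_or_self_of_dvd i.toNat hnat
        omega

-- a number ≥ 2 factors with both factors ≥ 2 iff it is not prime
theorem pvDecomp_iff (n : Int) (h : 2 ≤ n) :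
    (∃ i k : Int, 2 ≤ i ∧ 2 ≤ k ∧ i * k = n) ↔ ¬ Nat.Prime n.toNat := by
  constructor
  · rintro ⟨i, k, hi, hk, hik⟩ hp
    have hidvd : i ∣ n := ⟨k, hik.symm⟩
    have hnat : i.toNat ∣ n.toNat := by
      have e1 : i.toNat = i.natAbs := by omega
      have e2 : n.toNat = n.natAbs := by omega
      rw [e1, e2]
      exact Int.natAbs_dvd_natAbs.mpr hidvd
    rcases hp.eq_one_or_self_of_dvd i.toNat hnat with h1 | h1
    · omega
    · have he : i = n := by omega
      nlinarith
  · intro hp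
    obtain ⟨m, hmdvd, hm2, hmlt⟩ := Nat.exists_dvd_of_not_prime2 (by omega) hp
    obtain ⟨k, hk⟩ := hmdvd
    have hk2 : 2 ≤ k := by
      rcases Nat.lt_or_ge k 2 with hlt | hge
      · interval_cases k <;> omega
      · exact hge
    refine ⟨(m : Int), (k : Int), by omega, by omega, ?_⟩
    calc (m : Int) * (k : Int) = ((m * k : Nat) : Int) := by push_cast; ring
      _ = ((n.toNat : Nat) : Int) := by rw [← hk]
      _ = n := by omega

-- on the scanned range, the sieve lookup agrees with A's trial division
theorem pvTest_agree (limit n : Int) (h11 : 11 ≤ n) (hn : n ≤ limit) :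
    pvIsPrime n = !(PySem.List.pyGetD (pvSieve limit) n false) := by
  have hlen := pvSieve_length limit
  have hget : PySem.List.pyGetD (pvSieve limit) n false = (pvSieve limit).getD n.toNat false := by
    rw [PySem.List.pyGetD_eq_getElem _ _ (by omega) (by rw [hlen]; omega),
        List.getD_eq_getElem _ _ (by rw [hlen]; omega)]
  rw [hget]
  have h2 : 2 ≤ n := by omega
  cases hB : (pvSieve limit).getD n.toNat false with
  | false =>
    simp only [Bool.not_false]
    rw [pvIsPrime_iff n h2]
    by_contra hp
    have hdec := (pvDecomp_iff n h2).mpr hp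
    have := (pvSieve_getD limit n (by omega) hn).mpr hdec
    rw [hB] at this
    exact Bool.false_ne_true this
  | true =>
    simp only [Bool.not_true]
    have hdec := (pvSieve_getD limit n (by omega) hn).mp hB
    have hnp := (pvDecomp_iff n h2).mp hdec
    rw [← pvIsPrime_iff n h2] at hnp
    exact Bool.not_eq_true _ ▸ (Bool.eq_false_iff.mpr (fun hc => hnp hc))

-- A's prev-accumulator scan is B's zip-consecutive pairing
theorem pvScan_eq (P : Int → Bool) (l : List Int) : ∀ (res : List (List Int)) (prev : Int),
    (l.foldl
      (fun (st : List (List Int) × Int) n =>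
        if P n then (if n - st.2 > 2 then st.1 ++ [[st.2, n]] else st.1, n) else st)
      (res, prev)).1
    = res ++ (((prev :: l.filter P).zip (l.filter P)).filter
        (fun pq => pq.2 - pq.1 > 2)).map (fun pq => [pq.1, pq.2]) := by
  induction l with
  | nil => simp
  | cons n t ih =>
    intro res prev
    by_cases hp : P n = true
    · simp only [List.foldl_cons, List.filter_cons, hp, if_pos, List.zip_cons_cons, ih]
      by_cases hg : n - prev > 2
      · simp [hg]
      · simp [hg]
    · simp only [List.foldl_cons, List.filter_cons, hp, Bool.false_eq_true, ih]
      simp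

-- ===== VERDICT (by name: the statement is the Claim_ definition above) =====
theorem non_twin_primes_spec : Claim_equal_non_twin_primes := by
  intro limit _
  unfold Spec_non_twin_primes non_twin_primes non_twin_primes_alt
  rw [pvScan_eq pvIsPrime (PySem.List.pyRange 11 (limit + 1) 1) [] 7]
  have hfil : (PySem.List.pyRange 11 (limit + 1) 1).filter pvIsPrime
      = (PySem.List.pyRange 11 (limit + 1) 1).filter
          (fun n => !(PySem.List.pyGetD (pvSieve limit) n false)) :=
    List.filter_congr (fun n hn => by
      rw [PySem.List.mem_pyRange_one] at hn
      exact pvTest_agree limit n (by omega) (by omega))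
  rw [hfil]
  simp only [List.nil_append, List.tail_cons]
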